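-- pv_equiv track=rewrite | github.com/Fries91/torn-war-bot | torn_enemies.py | split_enemy_buckets
-- ===== SOURCE A (Python) =====
-- from typing import Any, Dict, List
--
-- def split_enemy_buckets(enemies: List[Dict[str, Any]]) -> Dict[str, List[Dict[str, Any]]]:
--     buckets = {
--         "online": [],
--         "idle": [],
--         "travel": [],
--         "hospital": [],
--         "jail": [],
--         "offline": [],
--     }
--
--     for member in list(enemies or []):
--         if not isinstance(member, dict):
--             continue
--
--         state = str(member.get("online_state") or "offline").strip().lower()
--         if state not in buckets:
--             state = "offline"
--         buckets[state].append(member)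
--
--     for key in buckets:
--         buckets[key].sort(key=lambda x: (str(x.get("name") or "").lower(), str(x.get("user_id") or "")))
--
--     return buckets
-- ===== SOURCE B (Python) =====
-- def split_enemy_buckets(enemies):
--     states = ("online", "idle", "travel", "hospital", "jail", "offline")
--
--     def norm_state(m):
--         s = str(m.get("online_state") or "offline").strip().lower()
--         return s if s in states else "offline"
--
--     ordered = sorted(
--         (m for m in (enemies or []) if isinstance(m, dict)),
--         key=lambda x: (str(x.get("name") or "").lower(), str(x.get("user_id") or "")),
--     )
--     return {s: [m for m in ordered if norm_state(m) == s] for s in states}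
-- ===== Notes on version B (the rewrite author's own statement) =====
-- stated objective: alternative
-- what changed: A fills a mutable dict of six buckets in one pass and then sorts each bucket in place; B sorts the whole list once with the same stable key and builds each bucket by an order-preserving filter of the sorted list, never mutating anything.
import Mathlib
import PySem

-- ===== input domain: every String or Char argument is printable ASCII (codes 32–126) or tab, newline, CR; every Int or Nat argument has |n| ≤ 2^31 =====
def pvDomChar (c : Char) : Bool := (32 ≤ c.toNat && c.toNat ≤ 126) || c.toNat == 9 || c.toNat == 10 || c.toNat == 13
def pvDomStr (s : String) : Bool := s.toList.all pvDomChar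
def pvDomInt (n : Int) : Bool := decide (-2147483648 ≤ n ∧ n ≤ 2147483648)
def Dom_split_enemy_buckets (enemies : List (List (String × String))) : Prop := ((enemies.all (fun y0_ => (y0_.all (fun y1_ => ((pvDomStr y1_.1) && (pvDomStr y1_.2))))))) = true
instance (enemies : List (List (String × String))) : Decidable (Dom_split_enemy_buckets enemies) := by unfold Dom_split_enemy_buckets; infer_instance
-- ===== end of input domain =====

-- B sorts the whole list once with the same stable key and builds each bucket by filtering
-- the sorted list, instead of A's mutable dict filled in one pass with each bucket sorted in place
-- (alternative decomposition, same asymptotic cost).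


-- ===== PORT A =====
-- shared helpers (the identical Python subexpressions appear in both A and B):
-- str(m.get(k) or dflt)  — values are strings, so `or` replaces a missing key or "" by dflt
def pvGetOr (m : List (String × String)) (k dflt : String) : String :=
  match (PySem.Dict.mk m).get? k with
  | some s => if s = "" then dflt else s
  | none => dflt

-- str(m.get("online_state") or "offline").strip().lower()
def pvRawState (m : List (String × String)) : String :=
  PySem.Str.lower (PySem.Str.strip (pvGetOr m "online_state" "offline"))

-- sort key: (str(x.get("name") or "").lower(), str(x.get("user_id") or ""))
def pvKey1 (m : List (String × String)) : String := PySem.Str.lower (pvGetOr m "name" "")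
def pvKey2 (m : List (String × String)) : String := pvGetOr m "user_id" ""

-- port of A: dict of six empty buckets; one pass appending each member to its bucket
-- (the `isinstance(member, dict)` guard is identically true under the type convention);
-- then a loop over the keys sorting each bucket in place; return the dict's items.
def split_enemy_buckets (enemies : List (List (String × String))) : List (String × List (List (String × String))) :=
  let buckets0 : PySem.Dict String (List (List (String × String))) :=
    ((((((PySem.Dict.empty.insert "online" []).insert "idle" []).insert "travel" []).insert
        "hospital" []).insert "jail" []).insert "offline" [])
  let buckets1 := enemies.foldl (fun d member =>
    let state := pvRawState member
    let state := if d.contains state then state else "offline"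
    d.modify state [] (fun v => v ++ [member])) buckets0
  let buckets2 := buckets1.keys.foldl (fun d k =>
    d.modify k [] (fun v => PySem.List.sorted2 v pvKey1 pvKey2)) buckets1
  buckets2.items

-- ===== PORT B =====
def pvStates : List String := ["online", "idle", "travel", "hospital", "jail", "offline"]

-- s if s in states else "offline"
def pvNormState (m : List (String × String)) : String :=
  let s := pvRawState m
  if s ∈ pvStates then s else "offline"

-- port of B: sort the whole list once (all members are dicts under the type convention),
-- then one filter of the sorted list per state key.
def split_enemy_buckets_alt (enemies : List (List (String × String))) : List (String × List (List (String × String))) :=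
  let ordered := PySem.List.sorted2 enemies pvKey1 pvKey2
  pvStates.map (fun s => (s, ordered.filter (fun m => pvNormState m == s)))

-- ===== PRECONDITION & SPEC =====
def Spec_split_enemy_buckets (enemies : List (List (String × String))) (out : List (String × List (List (String × String)))) : Prop := out = split_enemy_buckets_alt enemies
instance (enemies : List (List (String × String))) (out : List (String × List (List (String × String)))) : Decidable (Spec_split_enemy_buckets enemies out) := by unfold Spec_split_enemy_buckets; infer_instance

-- ===== CLAIM (what is proved, stated in full; the proofs are below) =====
def Claim_equal_split_enemy_buckets : Prop := ∀ (enemies : List (List (String × String))), Dom_split_enemy_buckets enemies → Spec_split_enemy_buckets enemies (split_enemy_buckets enemies)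

-- ===== LEMMAS AND PROOFS =====

-- the comparator used by PySem.List.sorted2 with keys pvKey1, pvKey2
def pvLt (a b : List (String × String)) : Bool :=
  decide (pvKey1 a < pvKey1 b) || (!decide (pvKey1 b < pvKey1 a) && decide (pvKey2 a < pvKey2 b))

lemma pvLt_iff (a b : List (String × String)) :
    pvLt a b = true ↔ pvKey1 a < pvKey1 b ∨ (pvKey1 a = pvKey1 b ∧ pvKey2 a < pvKey2 b) := by
  simp only [pvLt, Bool.or_eq_true, Bool.and_eq_true, Bool.not_eq_true', decide_eq_true_eq,
    decide_eq_false_iff_not]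
  constructor
  · rintro (h | ⟨h2, h3⟩)
    · exact Or.inl h
    · rcases lt_trichotomy (pvKey1 a) (pvKey1 b) with h' | h' | h'
      · exact Or.inl h'
      · exact Or.inr ⟨h', h3⟩
      · exact absurd h' h2
  · rintro (h | ⟨h2, h3⟩)
    · exact Or.inl h
    · exact Or.inr ⟨by rw [h2]; exact lt_irrefl _, h3⟩

lemma pvLt_false_iff (a b : List (String × String)) :
    pvLt a b = false ↔ ¬ (pvKey1 a < pvKey1 b ∨ (pvKey1 a = pvKey1 b ∧ pvKey2 a < pvKey2 b)) := by
  rw [← pvLt_iff, Bool.eq_false_iff, ne_eq]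

lemma pvLt_asym (a b : List (String × String)) (h : pvLt a b = true) : pvLt b a = false := by
  rw [pvLt_iff] at h
  rw [pvLt_false_iff]
  push_neg
  rcases h with h1 | ⟨h2, h3⟩
  · exact ⟨asymm h1, fun he => absurd (he ▸ h1) (lt_irrefl _)⟩
  · refine ⟨fun hlt => ?_, fun _ => asymm h3⟩
    rw [h2] at hlt
    exact lt_irrefl _ hlt

lemma pvLt_trans_not (a b c : List (String × String)) (h : pvLt a b = true)
    (hc : pvLt c b = false) : pvLt a c = true := by
  rw [pvLt_iff] at h
  rw [pvLt_false_iff] at hc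
  rw [pvLt_iff]
  push_neg at hc
  obtain ⟨hc1, hc2⟩ := hc
  rcases h with h1 | ⟨h2, h3⟩
  · exact Or.inl (lt_of_lt_of_le h1 (not_lt.mp hc1))
  · by_cases hac : pvKey1 a < pvKey1 c
    · exact Or.inl hac
    · have hbc : pvKey1 b ≤ pvKey1 c := not_lt.mp hc1
      rw [← h2] at hbc
      have hce : pvKey1 c = pvKey1 a := le_antisymm (not_lt.mp hac) hbc
      have hb2 : pvKey2 b ≤ pvKey2 c := not_lt.mp (hc2 (hce.trans h2))
      exact Or.inr ⟨hce.symm, lt_of_lt_of_le h3 hb2⟩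

-- removing a dropped element commutes with insertBy (no order hypothesis needed)
lemma filter_insertBy_neg {α : Type} (before : α → α → Bool) (p : α → Bool) (x : α)
    (ys : List α) (hx : p x = false) :
    (PySem.List.insertBy before x ys).filter p = ys.filter p := by
  induction ys with
  | nil => simp [PySem.List.insertBy, hx]
  | cons y ys ih =>
    by_cases h : before x y = true
    · simp [PySem.List.insertBy, h, hx]
    · simp only [PySem.List.insertBy, h, List.filter_cons]
      by_cases hy : p y = true <;> simp [hy, ih]

-- inserting a kept element commutes with filtering a before-sorted list
lemma filter_insertBy_pos {α : Type} (before : α → α → Bool)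
    (htr : ∀ a b c, before a b = true → before c b = false → before a c = true)
    (p : α → Bool) (x : α) (ys : List α)
    (hs : ys.Pairwise (fun a b => before b a = false)) (hx : p x = true) :
    (PySem.List.insertBy before x ys).filter p
      = PySem.List.insertBy before x (ys.filter p) := by
  induction ys with
  | nil => simp [PySem.List.insertBy, hx]
  | cons y ys ih =>
    rcases List.pairwise_cons.mp hs with ⟨hy, hys⟩
    by_cases h : before x y = true
    · by_cases hpy : p y = true
      · simp [PySem.List.insertBy, h, hx, hpy]
      · -- y is dropped: x still goes in front of every kept element of ys
        simp only [PySem.List.insertBy, h, if_true, List.filter_cons, hx, hpy,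
          Bool.false_eq_true, if_false]
        cases hfy : ys.filter p with
        | nil => simp [PySem.List.insertBy]
        | cons z zs =>
          have hz : z ∈ ys := List.mem_of_mem_filter (hfy ▸ List.mem_cons_self)
          have hxz : before x z = true := htr x y z h (hy z hz)
          simp [PySem.List.insertBy, hxz]
    · simp only [PySem.List.insertBy, h, List.filter_cons]
      by_cases hpy : p y = true
      · have hf : before x y = false := by simpa using h
        simp [PySem.List.insertBy, hpy, hf, ih hys]
      · simp [hpy, ih hys]

-- insertBy preserves before-sortedness
lemma pairwise_insertBy {α : Type} (before : α → α → Bool)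
    (hasym : ∀ a b, before a b = true → before b a = false)
    (htr : ∀ a b c, before a b = true → before c b = false → before a c = true)
    (x : α) (ys : List α) (hs : ys.Pairwise (fun a b => before b a = false)) :
    (PySem.List.insertBy before x ys).Pairwise (fun a b => before b a = false) := by
  induction ys with
  | nil => simp [PySem.List.insertBy]
  | cons y ys ih =>
    rcases List.pairwise_cons.mp hs with ⟨hy, hys⟩
    by_cases h : before x y = true
    · simp only [PySem.List.insertBy, h, if_true]
      refine List.pairwise_cons.mpr ⟨?_, hs⟩
      intro z hz
      rcases List.mem_cons.mp hz with rfl | hz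
      · exact hasym x z h
      · exact hasym x z (htr x y z h (hy z hz))
    · simp only [PySem.List.insertBy, h]
      refine List.pairwise_cons.mpr ⟨?_, ih hys⟩
      intro z hz
      rcases (PySem.List.mem_insertBy before x z ys).mp hz with rfl | hz
      · simpa using h
      · exact hy z hz

-- master lemma: filtering commutes with the insertion-sort fold
lemma filter_foldl_insertBy {α : Type} (before : α → α → Bool)
    (hasym : ∀ a b, before a b = true → before b a = false)
    (htr : ∀ a b c, before a b = true → before c b = false → before a c = true)
    (p : α → Bool) (xs : List α) :
    ∀ acc, acc.Pairwise (fun a b => before b a = false) →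
    (xs.foldl (fun a x => PySem.List.insertBy before x a) acc).filter p
      = (xs.filter p).foldl (fun a x => PySem.List.insertBy before x a) (acc.filter p) := by
  induction xs with
  | nil => intro acc _; simp
  | cons x xs ih =>
    intro acc hacc
    simp only [List.foldl_cons, List.filter_cons]
    by_cases hx : p x = true
    · rw [ih _ (pairwise_insertBy before hasym htr x acc hacc),
        filter_insertBy_pos before htr p x acc hacc hx, hx]
      simp
    · have hx' : p x = false := by simpa using hx
      rw [ih _ (pairwise_insertBy before hasym htr x acc hacc),
        filter_insertBy_neg before p x acc hx', hx']
      simp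

-- specialisation: a filter of the stably sorted list is the stable sort of the filtered list
lemma filter_sorted2 (xs : List (List (String × String)))
    (p : List (String × String) → Bool) :
    (PySem.List.sorted2 xs pvKey1 pvKey2).filter p
      = PySem.List.sorted2 (xs.filter p) pvKey1 pvKey2 := by
  have hrepr : ∀ ys : List (List (String × String)),
      PySem.List.sorted2 ys pvKey1 pvKey2
        = ys.foldl (fun a x => PySem.List.insertBy pvLt x a) [] := fun _ => rfl
  rw [hrepr, hrepr]
  simpa using filter_foldl_insertBy pvLt pvLt_asym pvLt_trans_not p xs [] (by simp)

-- the items of a dict with distinct keys are determined by keys and getD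
lemma items_eq_keys_map {κ ν : Type} [BEq κ] [LawfulBEq κ]
    (d : PySem.Dict κ ν) (d0 : ν) (h : d.keys.Nodup) :
    d.items = d.keys.map (fun k => (k, d.getD k d0)) := by
  have hk : d.keys = d.items.map (fun p => p.1) := by simp [PySem.Dict.keys]
  rw [hk, List.map_map]
  conv_lhs => rw [← List.map_id d.items]
  apply List.map_congr_left
  intro p hp
  obtain ⟨k, v⟩ := p
  have hg := PySem.Dict.getD_of_mem_items d hp h d0
  simp [Function.comp, hg]

lemma pvNormState_mem (m : List (String × String)) : pvNormState m ∈ pvStates := by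
  simp only [pvNormState]
  split_ifs with h'
  · exact h'
  · decide

-- A's first loop: the contains test against the accumulator is membership in pvStates
lemma loopA_eq (l : List (List (String × String)))
    (d : PySem.Dict String (List (List (String × String)))) (hk : d.keys = pvStates) :
    l.foldl (fun d member =>
      let state := pvRawState member
      let state := if d.contains state then state else "offline"
      d.modify state [] (fun v => v ++ [member])) d
    = l.foldl (fun d m => d.modify (pvNormState m) [] (fun v => v ++ [m])) d := by
  induction l generalizing d with
  | nil => simp only [List.foldl_nil]
  | cons m l ih =>
    have hc : ∀ s : String, d.contains s = decide (s ∈ pvStates) := by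
      intro s
      rw [PySem.Dict.contains_eq_decide_mem_keys, hk]
    have hstep : (if d.contains (pvRawState m) then pvRawState m else "offline")
        = pvNormState m := by
      simp [hc, pvNormState]
    have hcont : d.contains (pvNormState m) = true := by
      rw [hc]
      simpa using pvNormState_mem m
    have hk' : (d.modify (pvNormState m) [] (fun v => v ++ [m])).keys = pvStates := by
      rw [PySem.Dict.keys_modify, PySem.Dict.keys_insert_of_contains _ _ hcont, hk]
    simp only [List.foldl_cons, hstep]
    exact ih _ hk'

lemma set_update_subset {α : Type} [BEq α] [LawfulBEq α] (s : PySem.Set α) (xs : List α)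
    (h : ∀ x ∈ xs, x ∈ s) : PySem.Set.update s xs = s := by
  induction xs with
  | nil => rfl
  | cons x xs ih =>
    have hx : s.contains x = true := by
      simpa using h x List.mem_cons_self
    simp only [PySem.Set.update, List.foldl_cons, PySem.Set.add, hx, if_true]
    exact ih (fun y hy => h y (List.mem_cons_of_mem _ hy))

-- keys after the first loop
lemma keys_loopA (l : List (List (String × String)))
    (d : PySem.Dict String (List (List (String × String)))) (hk : d.keys = pvStates) :
    (l.foldl (fun d m => d.modify (pvNormState m) [] (fun v => v ++ [m])) d).keys
      = pvStates := by
  rw [PySem.Dict.keys_foldl_modify_key, hk]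
  apply set_update_subset
  intro x hx
  rcases List.mem_map.mp hx with ⟨m, _, rfl⟩
  exact pvNormState_mem m

-- getD after the first loop: the bucket of c is the filter of the members in order
lemma getD_loopA (l : List (List (String × String)))
    (d : PySem.Dict String (List (List (String × String)))) (hd : ∀ c, d.getD c [] = [])
    (c : String) :
    (l.foldl (fun d m => d.modify (pvNormState m) [] (fun v => v ++ [m])) d).getD c []
      = l.filter (fun m => pvNormState m == c) := by
  have hmap : l.foldl (fun d m => d.modify (pvNormState m) [] (fun v => v ++ [m])) d
      = (l.map (fun m => (pvNormState m, m))).foldl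
          (fun d p => d.modify p.1 [] (fun v => v ++ [p.2])) d := by
    rw [List.foldl_map]
  rw [hmap, PySem.Dict.getD_foldl_modify_append, hd]
  simp [List.filter_map, Function.comp_def]

-- getD after the sorting loop
lemma getD_sortLoop (ks : List String)
    (d : PySem.Dict String (List (List (String × String)))) (hnd : ks.Nodup) (c : String) :
    (ks.foldl (fun d k => d.modify k [] (fun v => PySem.List.sorted2 v pvKey1 pvKey2)) d).getD c []
      = if c ∈ ks then PySem.List.sorted2 (d.getD c []) pvKey1 pvKey2 else d.getD c [] := by
  induction ks generalizing d with
  | nil => simp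
  | cons k ks ih =>
    rcases List.nodup_cons.mp hnd with ⟨hk, hnd'⟩
    simp only [List.foldl_cons]
    rw [ih _ hnd']
    by_cases hck : c = k
    · subst hck
      simp [hk, PySem.Dict.getD_modify_self]
    · rw [PySem.Dict.getD_modify_of_ne _ _ _ hck]
      simp [List.mem_cons, hck]

-- keys after the sorting loop
lemma keys_sortLoop (ks : List String)
    (d : PySem.Dict String (List (List (String × String)))) (hks : ∀ k ∈ ks, k ∈ d.keys) :
    (ks.foldl (fun d k => d.modify k [] (fun v => PySem.List.sorted2 v pvKey1 pvKey2)) d).keys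
      = d.keys := by
  induction ks generalizing d with
  | nil => simp only [List.foldl_nil]
  | cons k ks ih =>
    simp only [List.foldl_cons]
    have hcd : d.contains k = true := by
      rw [PySem.Dict.contains_eq_decide_mem_keys]
      simpa using hks k List.mem_cons_self
    have hkeys : (d.modify k [] (fun v => PySem.List.sorted2 v pvKey1 pvKey2)).keys = d.keys := by
      rw [PySem.Dict.keys_modify, PySem.Dict.keys_insert_of_contains _ _ hcd]
    rw [ih _ (by rw [hkeys]; exact fun x hx => hks x (List.mem_cons_of_mem _ hx)), hkeys]

lemma pvStates_nodup : pvStates.Nodup := by decide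

-- characterisation of A's result: six buckets in key order, each the sorted filter
lemma split_A_eq (enemies : List (List (String × String))) :
    split_enemy_buckets enemies
      = pvStates.map (fun s =>
          (s, PySem.List.sorted2 (enemies.filter (fun m => pvNormState m == s)) pvKey1 pvKey2)) := by
  simp only [split_enemy_buckets]
  rw [loopA_eq _ _ (by decide)]
  rw [keys_loopA _ _ (by decide)]
  have hk1 := keys_loopA enemies _ (show (((((((PySem.Dict.empty.insert "online"
      ([] : List (List (String × String)))).insert "idle" []).insert "travel" []).insert
      "hospital" []).insert "jail" []).insert "offline" [])).keys = pvStates by decide)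
  set d1 := enemies.foldl (fun d m => d.modify (pvNormState m) [] (fun v => v ++ [m]))
    (((((((PySem.Dict.empty.insert "online"
      ([] : List (List (String × String)))).insert "idle" []).insert "travel" []).insert
      "hospital" []).insert "jail" []).insert "offline" [])) with hd1
  set d2 := pvStates.foldl (fun d k => d.modify k [] (fun v => PySem.List.sorted2 v pvKey1 pvKey2)) d1 with hd2
  have hk2 : d2.keys = pvStates := by
    rw [hd2, keys_sortLoop _ _ (by intro k hk; rw [hk1]; exact hk), hk1]
  have hnd2 : d2.keys.Nodup := by rw [hk2]; exact pvStates_nodup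
  rw [items_eq_keys_map d2 [] hnd2, hk2]
  apply List.map_congr_left
  intro s hs
  have hgd : d2.getD s [] = PySem.List.sorted2 (d1.getD s []) pvKey1 pvKey2 := by
    rw [hd2, getD_sortLoop _ _ pvStates_nodup]
    simp [hs]
  rw [hgd, hd1, getD_loopA _ _ (by
    intro c
    simp only [PySem.Dict.getD_insert]
    split_ifs <;> rfl)]

-- ===== VERDICT (by name: the statement is the Claim_ definition above) =====
theorem split_enemy_buckets_spec : Claim_equal_split_enemy_buckets := by
  intro enemies _
  unfold Spec_split_enemy_buckets split_enemy_buckets_alt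
  rw [split_A_eq]
  apply List.map_congr_left
  intro s _
  simp only [Prod.mk.injEq, true_and]
  rw [filter_sorted2]
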